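-- pv_equiv track=rewrite | github.com/YUR-AI-CREATIONS/YUR-FRANKLIN-OS | backend/build_engine.py | _docker_compose
-- ===== SOURCE A (Python) =====
-- from typing import Dict, List, Any, Optional
--
-- def _docker_compose(name: str, tech_stack: Dict) -> str:
--     services = {
--         "backend": {
--             "build": "./backend",
--             "ports": ["8000:8000"],
--             "environment": ["DATABASE_URL=${DATABASE_URL}"],
--             "depends_on": []
--         },
--         "frontend": {
--             "build": "./frontend",
--             "ports": ["3000:3000"],
--             "environment": ["API_URL=http://backend:8000"],
--             "depends_on": ["backend"]
--         }
--     }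
--
--     db_id = tech_stack.get("database")
--     if db_id == "postgresql":
--         services["database"] = {
--             "image": "postgres:16-alpine",
--             "environment": [
--                 "POSTGRES_USER=postgres",
--                 "POSTGRES_PASSWORD=postgres",
--                 "POSTGRES_DB=app"
--             ],
--             "volumes": ["pgdata:/var/lib/postgresql/data"]
--         }
--         services["backend"]["depends_on"].append("database")
--
--     cache_id = tech_stack.get("cache")
--     if cache_id == "redis":
--         services["redis"] = {
--             "image": "redis:7-alpine",
--             "ports": ["6379:6379"]
--         }
--
--     # Convert to YAML-like string
--     yaml = f"# {name} - Generated by SGP\nversion: '3.8'\n\nservices:\n"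
--
--     for svc_name, svc_config in services.items():
--         yaml += f"  {svc_name}:\n"
--         for key, value in svc_config.items():
--             if isinstance(value, list):
--                 yaml += f"    {key}:\n"
--                 for item in value:
--                     yaml += f"      - {item}\n"
--             else:
--                 yaml += f"    {key}: {value}\n"
--
--     if db_id == "postgresql":
--         yaml += "\nvolumes:\n  pgdata:\n"
--
--     return yaml
-- ===== SOURCE B (Python) =====
-- def _docker_compose(name: str, tech_stack: dict) -> str:
--     db = tech_stack.get("database") == "postgresql"
--     cache = tech_stack.get("cache") == "redis"
--     out = (f"# {name} - Generated by SGP\n"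
--            "version: '3.8'\n\nservices:\n"
--            "  backend:\n"
--            "    build: ./backend\n"
--            "    ports:\n      - 8000:8000\n"
--            "    environment:\n      - DATABASE_URL=${DATABASE_URL}\n"
--            "    depends_on:\n")
--     if db:
--         out += "      - database\n"
--     out += ("  frontend:\n"
--             "    build: ./frontend\n"
--             "    ports:\n      - 3000:3000\n"
--             "    environment:\n      - API_URL=http://backend:8000\n"
--             "    depends_on:\n      - backend\n")
--     if db:
--         out += ("  database:\n"
--                 "    image: postgres:16-alpine\n"
--                 "    environment:\n"
--                 "      - POSTGRES_USER=postgres\n"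
--                 "      - POSTGRES_PASSWORD=postgres\n"
--                 "      - POSTGRES_DB=app\n"
--                 "    volumes:\n      - pgdata:/var/lib/postgresql/data\n")
--     if cache:
--         out += ("  redis:\n"
--                 "    image: redis:7-alpine\n"
--                 "    ports:\n      - 6379:6379\n")
--     if db:
--         out += "\nvolumes:\n  pgdata:\n"
--     return out
-- ===== Notes on version B (the rewrite author's own statement) =====
-- stated objective: simpler
-- what changed: B drops the intermediate services dict and the generic isinstance-list serializer loop, emitting the YAML directly as a fixed sequence of literal blocks guarded by two booleans computed up front.
import Mathlib
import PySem

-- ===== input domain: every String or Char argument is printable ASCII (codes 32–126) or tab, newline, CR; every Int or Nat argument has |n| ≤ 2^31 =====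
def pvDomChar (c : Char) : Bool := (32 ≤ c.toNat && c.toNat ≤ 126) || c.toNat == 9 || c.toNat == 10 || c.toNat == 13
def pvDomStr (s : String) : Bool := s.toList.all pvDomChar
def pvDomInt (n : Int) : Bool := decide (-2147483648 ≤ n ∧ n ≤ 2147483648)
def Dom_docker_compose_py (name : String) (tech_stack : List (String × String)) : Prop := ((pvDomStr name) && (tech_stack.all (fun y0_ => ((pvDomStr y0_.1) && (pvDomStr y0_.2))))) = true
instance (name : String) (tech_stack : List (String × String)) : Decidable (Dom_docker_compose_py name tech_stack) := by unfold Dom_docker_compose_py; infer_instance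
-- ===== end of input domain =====

-- B replaces the services dict + generic serializer walk with direct emission of literal YAML blocks (simpler decomposition).



-- ===== PORT A =====
-- value of a service-config entry: a scalar string or a list of strings
inductive PVal
  | str : String → PVal
  | lst : List String → PVal
deriving DecidableEq, Repr

def docker_compose_py (name : String) (tech_stack : List (String × String)) : String :=
  let backend : PySem.Dict String PVal := PySem.Dict.mk
    [("build", PVal.str "./backend"), ("ports", PVal.lst ["8000:8000"]),
     ("environment", PVal.lst ["DATABASE_URL=${DATABASE_URL}"]), ("depends_on", PVal.lst [])]
  let frontend : PySem.Dict String PVal := PySem.Dict.mk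
    [("build", PVal.str "./frontend"), ("ports", PVal.lst ["3000:3000"]),
     ("environment", PVal.lst ["API_URL=http://backend:8000"]), ("depends_on", PVal.lst ["backend"])]
  let services : PySem.Dict String (PySem.Dict String PVal) :=
    PySem.Dict.mk [("backend", backend), ("frontend", frontend)]
  let db_id : Option String := (PySem.Dict.mk tech_stack).get? "database"
  let services :=
    if db_id == some "postgresql" then
      let services := services.insert "database" (PySem.Dict.mk
        [("image", PVal.str "postgres:16-alpine"),
         ("environment", PVal.lst ["POSTGRES_USER=postgres", "POSTGRES_PASSWORD=postgres", "POSTGRES_DB=app"]),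
         ("volumes", PVal.lst ["pgdata:/var/lib/postgresql/data"])])
      -- services["backend"]["depends_on"].append("database")
      services.modify "backend" PySem.Dict.empty (fun cfg =>
        cfg.modify "depends_on" (PVal.lst []) (fun v =>
          match v with
          | PVal.lst l => PVal.lst (l ++ ["database"])
          | v => v))
    else services
  let cache_id : Option String := (PySem.Dict.mk tech_stack).get? "cache"
  let services :=
    if cache_id == some "redis" then
      services.insert "redis" (PySem.Dict.mk
        [("image", PVal.str "redis:7-alpine"), ("ports", PVal.lst ["6379:6379"])])
    else services
  let yaml := "# " ++ name ++ " - Generated by SGP\nversion: '3.8'\n\nservices:\n"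
  let yaml := services.items.foldl (fun yaml p =>
    let yaml := yaml ++ "  " ++ p.1 ++ ":\n"
    p.2.items.foldl (fun yaml q =>
      match q.2 with
      | PVal.lst items =>
          items.foldl (fun y it => y ++ "      - " ++ it ++ "\n") (yaml ++ "    " ++ q.1 ++ ":\n")
      | PVal.str v => yaml ++ "    " ++ q.1 ++ ": " ++ v ++ "\n") yaml) yaml
  if db_id == some "postgresql" then yaml ++ "\nvolumes:\n  pgdata:\n" else yaml

-- ===== PORT B =====
def docker_compose_py_alt (name : String) (tech_stack : List (String × String)) : String :=
  let db := (PySem.Dict.mk tech_stack).get? "database" == some "postgresql"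
  let cache := (PySem.Dict.mk tech_stack).get? "cache" == some "redis"
  let out := "# " ++ name ++ " - Generated by SGP\nversion: '3.8'\n\nservices:\n  backend:\n    build: ./backend\n    ports:\n      - 8000:8000\n    environment:\n      - DATABASE_URL=${DATABASE_URL}\n    depends_on:\n"
  let out := if db then out ++ "      - database\n" else out
  let out := out ++ "  frontend:\n    build: ./frontend\n    ports:\n      - 3000:3000\n    environment:\n      - API_URL=http://backend:8000\n    depends_on:\n      - backend\n"
  let out := if db then out ++ "  database:\n    image: postgres:16-alpine\n    environment:\n      - POSTGRES_USER=postgres\n      - POSTGRES_PASSWORD=postgres\n      - POSTGRES_DB=app\n    volumes:\n      - pgdata:/var/lib/postgresql/data\n" else out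
  let out := if cache then out ++ "  redis:\n    image: redis:7-alpine\n    ports:\n      - 6379:6379\n" else out
  if db then out ++ "\nvolumes:\n  pgdata:\n" else out

-- ===== PRECONDITION & SPEC =====
def Spec_docker_compose_py (name : String) (tech_stack : List (String × String)) (out : String) : Prop := out = docker_compose_py_alt name tech_stack
instance (name : String) (tech_stack : List (String × String)) (out : String) : Decidable (Spec_docker_compose_py name tech_stack out) := by unfold Spec_docker_compose_py; infer_instance

-- ===== CLAIM (what is proved, stated in full; the proofs are below) =====
def Claim_equal_docker_compose_py : Prop := ∀ (name : String) (tech_stack : List (String × String)), Dom_docker_compose_py name tech_stack → Spec_docker_compose_py name tech_stack (docker_compose_py name tech_stack)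

-- ===== LEMMAS AND PROOFS =====

-- ===== VERDICT (by name: the statement is the Claim_ definition above) =====
set_option maxRecDepth 4000 in
theorem docker_compose_py_spec : Claim_equal_docker_compose_py := by
  intro name tech_stack _
  unfold Spec_docker_compose_py docker_compose_py docker_compose_py_alt
  by_cases hdb : (PySem.Dict.mk tech_stack).get? "database" = some "postgresql" <;>
  by_cases hc : (PySem.Dict.mk tech_stack).get? "cache" = some "redis" <;>
    (simp only [beq_iff_eq, hdb, hc]
     simp [PySem.Dict.insert, PySem.Dict.contains, PySem.Dict.modify, PySem.Dict.getD,
           PySem.Dict.get?, String.append_assoc])
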